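-- pv_equiv track=rewrite | github.com/thrimos616/AyED1-2025-TPs | tp4/ej9.py | ordenar_por_longitud
-- ===== SOURCE A (Python) =====
-- def ordenar_por_longitud(cadena: str) -> str:
--
--     signos = ",.;:!?¡¿"
--     palabras = cadena.split()
--
--     # Limpia las palabras
--     lista_palabras = []
--
--     for palabra in palabras:
--
--         palabra_limpia = ""
--
--         # esto tal vez tenga una manera mas eficiente, pero como buen procastinador, no tengo tiempo ;)
--         for c in palabra:
--
--             if c not in signos:
--
--                 palabra_limpia += c
--
--         lista_palabras.append((palabra, len(palabra_limpia)))
--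
--     # Se ordenan por longitud con una lambda
--     lista_palabras.sort(key=lambda x: x[1])
--
--
--     cadena_ordenada = " ".join([p[0] for p in lista_palabras])
--
--     return cadena_ordenada
-- ===== SOURCE B (Python) =====
-- def ordenar_por_longitud(cadena: str) -> str:
--     signos = ",.;:!?¡¿"
--     buckets = {}
--     max_len = 0
--     for palabra in cadena.split():
--         n = len([c for c in palabra if c not in signos])
--         buckets.setdefault(n, []).append(palabra)
--         max_len = max(max_len, n)
--     resultado = []
--     for n in range(max_len + 1):
--         resultado.extend(buckets.get(n, []))
--     return " ".join(resultado)
-- ===== Notes on version B (the rewrite author's own statement) =====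
-- stated objective: alternative
-- what changed: Replaces the comparison (stable Timsort) sort and the per-word character-by-character string concatenation with a one-pass stable bucket/counting sort: each word's cleaned length is computed by a filter, words are appended to a dict bucket keyed by that length, and the result is the buckets concatenated for lengths 0..max.
import Mathlib
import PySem

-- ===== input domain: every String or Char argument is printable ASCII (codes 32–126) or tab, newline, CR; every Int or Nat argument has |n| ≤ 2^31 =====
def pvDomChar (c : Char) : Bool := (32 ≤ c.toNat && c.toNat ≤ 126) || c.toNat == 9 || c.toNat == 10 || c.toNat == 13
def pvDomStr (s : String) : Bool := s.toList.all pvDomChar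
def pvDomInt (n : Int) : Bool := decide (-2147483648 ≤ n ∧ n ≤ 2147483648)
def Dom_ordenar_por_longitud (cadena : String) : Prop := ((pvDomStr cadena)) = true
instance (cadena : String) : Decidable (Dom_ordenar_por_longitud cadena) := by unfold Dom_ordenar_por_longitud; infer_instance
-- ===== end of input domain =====

-- B replaces A's comparison sort (plus per-word quadratic string building) by a stable
-- bucket/counting sort on the punctuation-stripped lengths: alternative algorithm, same result.

-- the punctuation characters of A's `signos` string (shared constant data)
def pvSignos : List Char := [',', '.', ';', ':', '!', '?', '¡', '¿']

-- ===== PORT A =====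
def ordenar_por_longitud (cadena : String) : String :=
  let palabras := PySem.Str.split₀ cadena
  -- for palabra in palabras: build palabra_limpia char by char, append (palabra, len)
  let lista_palabras : List (String × Int) := palabras.foldl (fun acc palabra =>
      let palabra_limpia : List Char := palabra.toList.foldl
        (fun w c => if !(pvSignos.contains c) then w ++ [c] else w) []
      acc ++ [(palabra, (palabra_limpia.length : Int))]) []
  -- lista_palabras.sort(key=lambda x: x[1]) — stable
  PySem.Str.join " " ((PySem.List.sorted lista_palabras (fun x => x.2) false).map (fun p => p.1))

-- ===== PORT B =====
def ordenar_por_longitud_alt (cadena : String) : String :=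
  -- one pass: buckets[n] = buckets.get(n, []) + [palabra];  max_len = max(max_len, n)
  let st := (PySem.Str.split₀ cadena).foldl
      (fun s palabra =>
        let n : Int := ((palabra.toList.filter (fun c => !(pvSignos.contains c))).length : Int)
        (s.1.modify n [] (fun l => l ++ [palabra]), max s.2 n))
      ((PySem.Dict.empty : PySem.Dict Int (List String)), (0 : Int))
  -- for n in range(max_len + 1): resultado.extend(buckets.get(n, []))
  let resultado := (PySem.List.pyRange 0 (st.2 + 1) 1).foldl (fun acc n => acc ++ st.1.getD n []) []
  PySem.Str.join " " resultado

-- ===== PRECONDITION & SPEC =====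
def Spec_ordenar_por_longitud (cadena : String) (out : String) : Prop := out = ordenar_por_longitud_alt cadena
instance (cadena : String) (out : String) : Decidable (Spec_ordenar_por_longitud cadena out) := by unfold Spec_ordenar_por_longitud; infer_instance

-- ===== CLAIM (what is proved, stated in full; the proofs are below) =====
def Claim_equal_ordenar_por_longitud : Prop := ∀ (cadena : String), Dom_ordenar_por_longitud cadena → Spec_ordenar_por_longitud cadena (ordenar_por_longitud cadena)

-- ===== LEMMAS AND PROOFS =====

-- cleaned length of a word (the sort key of both programs)
def pvKey (w : String) : Int := ((w.toList.filter (fun c => !(pvSignos.contains c))).length : Int)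

lemma insertBy_append_of_not_before {α : Type} (before : α → α → Bool) (a : α) (ys zs : List α)
    (h : ∀ y ∈ ys, before a y = false) :
    PySem.List.insertBy before a (ys ++ zs) = ys ++ PySem.List.insertBy before a zs := by
  induction ys with
  | nil => simp
  | cons y t ih =>
    simp only [List.cons_append, PySem.List.insertBy, h y (by simp)]
    simp only [Bool.false_eq_true, if_false]
    rw [ih (fun y hy => h y (by simp [hy]))]

lemma insertBy_eq_cons_of_forall_before {α : Type} (before : α → α → Bool) (a : α) (zs : List α)
    (h : ∀ y ∈ zs, before a y = true) :
    PySem.List.insertBy before a zs = a :: zs := by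
  cases zs with
  | nil => simp [PySem.List.insertBy]
  | cons y t => simp [PySem.List.insertBy, h y (by simp)]

lemma flatMap_filter_ite {α β : Type} (l : List α) (f : α → List β) (p : α → Bool) (a : β)
    (h : ∀ n ∈ l, p n = false) :
    l.flatMap (fun n => f n ++ if p n then [a] else []) = l.flatMap f := by
  induction l with
  | nil => rfl
  | cons x t ih =>
    simp only [List.flatMap_cons, h x (by simp), Bool.false_eq_true, if_false, List.append_nil]
    rw [ih (fun n hn => h n (by simp [hn]))]

-- a stable sort on Int keys in [0, N) is the concatenation of the key buckets, in key order
lemma sorted_eq_buckets {α : Type} (L : List α) (key : α → Int) (N : Int)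
    (h : ∀ x ∈ L, 0 ≤ key x ∧ key x < N) :
    PySem.List.sorted L key false =
      (PySem.List.pyRange 0 N 1).flatMap (fun n => L.filter (fun x => key x == n)) := by
  induction L using List.reverseRecOn with
  | nil => rw [PySem.List.sorted_eq_foldl_insertBy]; simp
  | append_singleton L a ih =>
    have hL : ∀ x ∈ L, 0 ≤ key x ∧ key x < N := fun x hx => h x (by simp [hx])
    have ha := h a (by simp)
    rw [PySem.List.sorted_eq_foldl_insertBy, List.foldl_append, List.foldl_cons, List.foldl_nil,
      ← PySem.List.sorted_eq_foldl_insertBy, ih hL]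
    -- split the range at key a + 1
    have hsplit : PySem.List.pyRange 0 N 1 =
        PySem.List.pyRange 0 (key a + 1) 1 ++ PySem.List.pyRange (key a + 1) N 1 :=
      PySem.List.pyRange_one_append 0 (key a + 1) N (by omega) (by omega)
    have hlow : PySem.List.pyRange 0 (key a + 1) 1 = PySem.List.pyRange 0 (key a) 1 ++ [key a] :=
      PySem.List.pyRange_one_succ_right ha.1
    -- LHS: skip over the buckets with key ≤ key a, insert in front of the rest
    rw [hsplit, List.flatMap_append,
      insertBy_append_of_not_before _ _ _ _ (by
        intro y hy
        simp only [List.mem_flatMap, List.mem_filter] at hy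
        obtain ⟨n, hn, _, hk⟩ := hy
        rw [PySem.List.mem_pyRange_one] at hn
        simp only [beq_iff_eq] at hk
        simp only [decide_eq_false_iff_not, not_lt]
        omega),
      insertBy_eq_cons_of_forall_before _ _ _ (by
        intro y hy
        simp only [List.mem_flatMap, List.mem_filter] at hy
        obtain ⟨n, hn, _, hk⟩ := hy
        rw [PySem.List.mem_pyRange_one] at hn
        simp only [beq_iff_eq] at hk
        simp only [decide_eq_true_eq]
        omega)]
    -- RHS: the new element lands at the end of its own bucket
    have hfil : ∀ n : Int, (L ++ [a]).filter (fun x => key x == n) =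
        L.filter (fun x => key x == n) ++ (if key a == n then [a] else []) := by
      intro n
      rw [List.filter_append]
      congr 1
      by_cases hk : key a == n <;> simp [List.filter, hk]
    simp only [hfil]
    conv_rhs => rw [List.flatMap_append]
    rw [flatMap_filter_ite (PySem.List.pyRange (key a + 1) N 1)
        (fun n => L.filter (fun x => key x == n)) (fun n => key a == n) a (by
        intro n hn
        rw [PySem.List.mem_pyRange_one] at hn
        simp only [beq_eq_false_iff_ne, ne_eq]
        omega)]
    rw [hlow, List.flatMap_append, List.flatMap_append]
    rw [flatMap_filter_ite (PySem.List.pyRange 0 (key a) 1)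
        (fun n => L.filter (fun x => key x == n)) (fun n => key a == n) a (by
        intro n hn
        rw [PySem.List.mem_pyRange_one] at hn
        simp only [beq_eq_false_iff_ne, ne_eq]
        omega)]
    simp [List.flatMap_cons, List.append_assoc]

-- ===== VERDICT (by name: the statement is the Claim_ definition above) =====
theorem ordenar_por_longitud_spec : Claim_equal_ordenar_por_longitud := by
  intro cadena _
  unfold Spec_ordenar_por_longitud ordenar_por_longitud ordenar_por_longitud_alt
  set palabras := PySem.Str.split₀ cadena with hp
  -- A's list-building loop is the decorate map
  simp only [PySem.List.foldl_append_if_eq_filter, List.nil_append,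
    PySem.List.foldl_append_singleton_eq_map]
  -- B's pair-state loop splits into the dict fold and the running max
  have hk : ∀ w : String, ((w.toList.filter (fun c => !(pvSignos.contains c))).length : Int) = pvKey w :=
    fun _ => rfl
  simp only [hk]
  rw [PySem.List.foldl_prod_mk (fun d w => PySem.Dict.modify d (pvKey w) [] (fun l => l ++ [w]))
    (fun m w => max m (pvKey w)) palabras PySem.Dict.empty 0]
  set m := palabras.foldl (fun acc w => max acc (pvKey w)) 0 with hm
  have hmax := PySem.List.le_foldl_max_int palabras pvKey 0
  -- the dict's buckets
  have hdict : ∀ c : Int,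
      (palabras.foldl (fun d w => PySem.Dict.modify d (pvKey w) [] (fun l => l ++ [w]))
        PySem.Dict.empty).getD c [] = palabras.filter (fun w => pvKey w == c) := by
    intro c
    have hfm := (List.foldl_map (f := fun w : String => (pvKey w, w))
      (g := fun (d : PySem.Dict Int (List String)) (p : Int × String) =>
        PySem.Dict.modify d p.1 [] (fun l => l ++ [p.2]))
      (l := palabras) (init := (PySem.Dict.empty : PySem.Dict Int (List String))))
    beta_reduce at hfm
    rw [← hfm, PySem.Dict.getD_foldl_modify_append]
    simp [List.filter_map, Function.comp_def]
  simp only [hdict, PySem.List.foldl_append_eq_flatMap, List.nil_append]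
  -- A's sorted list is the bucket concatenation
  rw [sorted_eq_buckets (palabras.map (fun w => (w, pvKey w))) (fun x => x.2) (m + 1) (by
    intro x hx
    simp only [List.mem_map] at hx
    obtain ⟨w, hw, rfl⟩ := hx
    have h2 := hmax.2 w hw
    have h0 : (0 : Int) ≤ pvKey w := by unfold pvKey; positivity
    simp only
    omega)]
  congr 1
  rw [List.map_flatMap]
  refine List.flatMap_congr ?_
  intro n _
  simp [List.filter_map, Function.comp_def, List.map_map]
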